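-- pv_equiv track=rewrite | github.com/juanmartin/universal-dj-usb | src/universal_dj_usb/nml_generator.py | _format_traktor_file_path
-- ===== SOURCE A (Python) =====
-- def _format_traktor_file_path(path_str: str) -> str:
--     """
--     Format a complete file path for Traktor's NML format.
--
--     Args:
--         path_str: Standard file path string with forward slashes
--
--     Returns:
--         Formatted file path string for Traktor NML format
--     """
--     if not path_str:
--         return ""
--
--     # Normalize the path to ensure it starts with /
--     if not path_str.startswith("/"):
--         path_str = "/" + path_str
--
--     # Split the path into parts, removing empty parts
--     parts = [part for part in path_str.split("/") if part]
--
--     # Join with /: separator and add leading /: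
--     if parts:
--         return "/:" + "/:".join(parts)
--     else:
--         return ""
-- ===== SOURCE B (Python) =====
-- def _format_traktor_file_path(path_str: str) -> str:
--     """Single left-to-right character scan: emit the slash-colon separator at the start of each
--     maximal run of non-slash characters; no split/filter/join lists."""
--     out = []
--     boundary = True
--     for ch in path_str:
--         if ch == '/':
--             boundary = True
--         else:
--             if boundary:
--                 out.append('/')
--                 out.append(':')
--                 boundary = False
--             out.append(ch)
--     return ''.join(out)
-- ===== Notes on version B (the rewrite author's own statement) =====
-- stated objective: alternative
-- what changed: Replaces A's normalize/split/filter/join pipeline with a single character scan that emits the slash-colon separator at each segment start, keeping only a boundary flag and the output buffer.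
import Mathlib
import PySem

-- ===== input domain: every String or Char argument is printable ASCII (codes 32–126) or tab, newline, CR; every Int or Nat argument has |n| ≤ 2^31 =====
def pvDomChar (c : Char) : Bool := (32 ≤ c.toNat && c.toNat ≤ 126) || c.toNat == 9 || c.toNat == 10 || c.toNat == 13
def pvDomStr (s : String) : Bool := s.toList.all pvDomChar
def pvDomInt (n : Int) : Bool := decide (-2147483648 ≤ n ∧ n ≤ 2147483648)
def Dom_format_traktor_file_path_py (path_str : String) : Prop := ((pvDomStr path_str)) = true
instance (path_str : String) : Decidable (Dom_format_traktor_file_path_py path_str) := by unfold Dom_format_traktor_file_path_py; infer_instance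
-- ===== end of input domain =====

-- B replaces A's normalize/split/filter/join pipeline with a single character
-- scan that emits the slash-colon separator at each segment start (objective: alternative).

-- ===== PORT A =====
def format_traktor_file_path_py (path_str : String) : String :=
  if path_str = "" then ""
  else
    -- "/" + path_str when it does not start with "/"
    let ps : List Char :=
      if PySem.Str.startswith path_str "/" then path_str.toList else '/' :: path_str.toList
    -- parts = [part for part in path_str.split("/") if part]
    let parts := (PySem.Chars.splitOn ps ['/']).filter (fun p => p ≠ [])
    if parts ≠ [] then String.mk ('/' :: ':' :: PySem.Chars.join ['/', ':'] parts)
    else ""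

-- ===== PORT B =====
def format_traktor_file_path_py_alt (path_str : String) : String :=
  let r := path_str.toList.foldl
    (fun (st : List Char × Bool) ch =>
      if ch = '/' then (st.1, true)
      else if st.2 then (st.1 ++ ['/', ':', ch], false)
      else (st.1 ++ [ch], false))
    ([], true)
  String.mk r.1

-- ===== PRECONDITION & SPEC =====
def Spec_format_traktor_file_path_py (path_str : String) (out : String) : Prop := out = format_traktor_file_path_py_alt path_str
instance (path_str : String) (out : String) : Decidable (Spec_format_traktor_file_path_py path_str out) := by unfold Spec_format_traktor_file_path_py; infer_instance

-- ===== CLAIM (what is proved, stated in full; the proofs are below) =====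
def Claim_equal_format_traktor_file_path_py : Prop := ∀ (path_str : String), Dom_format_traktor_file_path_py path_str → Spec_format_traktor_file_path_py path_str (format_traktor_file_path_py path_str)

-- ===== LEMMAS AND PROOFS =====

-- reference: the nonempty '/'-separated segments of a char list
def pvFsegs : List Char → List (List Char)
  | [] => []
  | c :: r =>
    if c = '/' then pvFsegs r
    else (c :: r.takeWhile (· ≠ '/')) :: pvFsegs (r.dropWhile (· ≠ '/'))
termination_by cs => cs.length
decreasing_by
  · simp
  · have := List.length_dropWhile_le (fun x => decide (x ≠ '/')) r
    simp only [List.length_cons]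
    omega

-- reference rendering
def pvOut (segs : List (List Char)) : List Char :=
  (segs.map (fun s => '/' :: ':' :: s)).flatten

-- fuel-free model of PySem.Chars.splitOn.go for the one-char separator '/'
def pvSp : List Char → List Char → List (List Char)
  | [], cur => [cur.reverse]
  | c :: r, cur => if c = '/' then cur.reverse :: pvSp r [] else pvSp r (c :: cur)

theorem pvFsegs_slash (cs : List Char) : pvFsegs ('/' :: cs) = pvFsegs cs := by
  simp [pvFsegs]

theorem pvGo_spec (fuel : Nat) (l cur : List Char) (acc : List (List Char))
    (h : l.length ≤ fuel) :
    PySem.Chars.splitOn.go ['/'] fuel l cur acc = acc.reverse ++ pvSp l cur := by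
  induction fuel generalizing l cur acc with
  | zero =>
    cases l with
    | nil => simp [PySem.Chars.splitOn.go, pvSp]
    | cons c r => simp at h
  | succ n ih =>
    cases l with
    | nil => simp [PySem.Chars.splitOn.go, pvSp]
    | cons c r =>
      simp only [PySem.Chars.splitOn.go, pvSp]
      by_cases hc : c = '/'
      · subst hc
        simp only [List.isPrefixOf, beq_self_eq_true, Bool.true_and, if_pos]
        rw [show (List.drop ['/'].length ('/' :: r)) = r from rfl,
          ih r [] (cur.reverse :: acc) (by simpa using Nat.le_of_succ_le_succ h)]
        simp
      · have hpre : (['/'].isPrefixOf (c :: r)) = false := by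
          simp [List.isPrefixOf]
          exact fun hcontra => hc hcontra.symm
        simp only [hpre, Bool.false_eq_true, if_false, if_neg hc]
        exact ih r (c :: cur) acc (by simpa using Nat.le_of_succ_le_succ h)

theorem pvSp_filter (cs : List Char) (cur : List Char) :
    (pvSp cs cur).filter (fun p => p ≠ []) =
      if cur = [] then pvFsegs cs
      else (cur.reverse ++ cs.takeWhile (· ≠ '/')) :: pvFsegs (cs.dropWhile (· ≠ '/')) := by
  induction cs generalizing cur with
  | nil =>
    by_cases hcur : cur = []
    · subst hcur; simp [pvSp, pvFsegs]
    · have hne : cur.reverse ≠ [] := by simp [hcur]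
      simp [pvSp, pvFsegs, hne, hcur]
  | cons c r ih =>
    by_cases hc : c = '/'
    · subst hc
      rw [show pvSp ('/' :: r) cur = cur.reverse :: pvSp r [] from by simp [pvSp]]
      have ih0 := ih []
      rw [if_pos rfl] at ih0
      by_cases hcur : cur = []
      · subst hcur
        simpa [pvFsegs_slash] using ih0
      · have hne : cur.reverse ≠ [] := by simp [hcur]
        rw [List.filter_cons, if_pos (by simpa using hne), ih0, if_neg hcur]
        simp [pvFsegs_slash]
    · rw [show pvSp (c :: r) cur = pvSp r (c :: cur) from by simp [pvSp, hc],
        ih (c :: cur), if_neg (by simp)]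
      by_cases hcur : cur = []
      · subst hcur
        rw [if_pos rfl]
        simp [pvFsegs, hc]
      · rw [if_neg hcur]
        simp [hc]

theorem pvSplitOn_filter (cs : List Char) :
    ((PySem.Chars.splitOn cs ['/']).filter (fun p => p ≠ [])) = pvFsegs cs := by
  unfold PySem.Chars.splitOn
  rw [pvGo_spec (cs.length + 1) cs [] [] (Nat.le_succ _)]
  simpa using pvSp_filter cs []

theorem pvJoin_out (p : List Char) (rest : List (List Char)) :
    '/' :: ':' :: PySem.Chars.join ['/', ':'] (p :: rest) = pvOut (p :: rest) := by
  induction rest generalizing p with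
  | nil => simp [PySem.Chars.join_singleton, pvOut]
  | cons q rest ih =>
    rw [PySem.Chars.join_cons_cons]
    have h := ih q
    simp only [pvOut, List.map_cons, List.flatten_cons] at h ⊢
    rw [← h]
    simp

theorem pvFold_spec (cs : List Char) : ∀ (acc : List Char) (b : Bool), ∃ b' : Bool,
    cs.foldl
      (fun (st : List Char × Bool) ch =>
        if ch = '/' then (st.1, true)
        else if st.2 then (st.1 ++ ['/', ':', ch], false)
        else (st.1 ++ [ch], false))
      (acc, b) =
      (acc ++ (if b then pvOut (pvFsegs cs)
        else cs.takeWhile (· ≠ '/') ++ pvOut (pvFsegs (cs.dropWhile (· ≠ '/')))), b') := by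
  induction cs with
  | nil => intro acc b; exact ⟨b, by cases b <;> simp [pvOut, pvFsegs]⟩
  | cons c r ih =>
    intro acc b
    by_cases hc : c = '/'
    · subst hc
      obtain ⟨b', hb⟩ := ih acc true
      refine ⟨b', ?_⟩
      simp only [List.foldl_cons, reduceIte]
      rw [hb]
      cases b <;> simp [pvFsegs_slash]
    · cases b with
      | true =>
        obtain ⟨b', hb⟩ := ih (acc ++ ['/', ':', c]) false
        refine ⟨b', ?_⟩
        simp only [List.foldl_cons, if_neg hc, if_true]
        rw [hb]
        simp [pvFsegs, hc, pvOut]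
      | false =>
        obtain ⟨b', hb⟩ := ih (acc ++ [c]) false
        refine ⟨b', ?_⟩
        simp only [List.foldl_cons, if_neg hc, Bool.false_eq_true, if_false]
        rw [hb]
        simp [hc]

-- ===== VERDICT (by name: the statement is the Claim_ definition above) =====
theorem format_traktor_file_path_py_spec : Claim_equal_format_traktor_file_path_py := by
  intro path_str _
  unfold Spec_format_traktor_file_path_py format_traktor_file_path_py format_traktor_file_path_py_alt
  dsimp only
  obtain ⟨b', hb⟩ := pvFold_spec path_str.toList [] true
  have hB : (path_str.toList.foldl
      (fun (st : List Char × Bool) ch =>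
        if ch = '/' then (st.1, true)
        else if st.2 then (st.1 ++ ['/', ':', ch], false)
        else (st.1 ++ [ch], false)) ([], true)).1 = pvOut (pvFsegs path_str.toList) := by
    rw [hb]; simp
  by_cases hnil : path_str = ""
  · subst hnil
    rw [if_pos rfl, hB, show ("".toList : List Char) = [] from rfl,
      show pvFsegs [] = [] from by simp [pvFsegs]]
    rfl
  · rw [if_neg hnil]
    set ps : List Char :=
      if PySem.Str.startswith path_str "/" then path_str.toList else '/' :: path_str.toList with hps
    have hsegs : pvFsegs ps = pvFsegs path_str.toList := by
      rw [hps]; split <;> simp [pvFsegs_slash]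
    rw [pvSplitOn_filter, hsegs]
    cases hf : pvFsegs path_str.toList with
    | nil =>
      rw [if_neg (by simp), hB, hf]
      rfl
    | cons p rest =>
      rw [if_pos (by simp), hB, hf]
      exact congrArg String.mk (pvJoin_out p rest)
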